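-- pv_equiv track=rewrite | github.com/val-is/advent-of-code | 2020/day24.py | iterate_day
-- ===== SOURCE A (Python) =====
-- deltas = {
--     "e":    (-1, 1),
--     "ne":   (-1, 0),
--     "nw":   (0, -1),
--     "w":    (1, -1),
--     "sw":   (1, 0),
--     "se":   (0, 1)
-- }
--
-- def neighbors(pos):
--     x, y = pos
--     return [(x+dx, y+dy) for dx, dy in deltas.values()]
--
-- def iterate_day(black):
--     tiles_adj = {}
--     for tile in black:
--         for neighbor in neighbors(tile):
--             tiles_adj[neighbor] = tiles_adj.get(neighbor, 0) + 1
--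
--     new_black = set()
--     for tile in tiles_adj:
--         if tile in black and (1 <= tiles_adj[tile] <= 2):
--             new_black.add(tile)
--         elif tile not in black and (tiles_adj[tile] == 2):
--             new_black.add(tile)
--     return new_black
-- ===== SOURCE B (Python) =====
-- deltas = {
--     "e":    (-1, 1),
--     "ne":   (-1, 0),
--     "nw":   (0, -1),
--     "w":    (1, -1),
--     "sw":   (1, 0),
--     "se":   (0, 1)
-- }
--
-- def neighbors(pos):
--     x, y = pos
--     return [(x+dx, y+dy) for dx, dy in deltas.values()]
--
-- def iterate_day(black):
--     # collect candidate tiles: every neighbor of a black tile, first occurrence order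
--     candidates = []
--     for tile in black:
--         for n in neighbors(tile):
--             if n not in candidates:
--                 candidates.append(n)
--     new_black = set()
--     for tile in candidates:
--         nbrs = neighbors(tile)
--         # recount black neighbors on the fly (with multiplicity over the black list)
--         cnt = sum(1 for b in black if b in nbrs)
--         if tile in black:
--             if 1 <= cnt <= 2:
--                 new_black.add(tile)
--         elif cnt == 2:
--             new_black.add(tile)
--     return new_black
-- ===== Notes on version B (the rewrite author's own statement) =====
-- stated objective: alternative
-- what changed: Replaces the tally-dict accumulation pass with a candidate-list collection (union of neighbors of black tiles in first-occurrence order) followed by a per-candidate rescan of the black list that recounts black neighbors on the fly, applying the same flip rules.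
import Mathlib
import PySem

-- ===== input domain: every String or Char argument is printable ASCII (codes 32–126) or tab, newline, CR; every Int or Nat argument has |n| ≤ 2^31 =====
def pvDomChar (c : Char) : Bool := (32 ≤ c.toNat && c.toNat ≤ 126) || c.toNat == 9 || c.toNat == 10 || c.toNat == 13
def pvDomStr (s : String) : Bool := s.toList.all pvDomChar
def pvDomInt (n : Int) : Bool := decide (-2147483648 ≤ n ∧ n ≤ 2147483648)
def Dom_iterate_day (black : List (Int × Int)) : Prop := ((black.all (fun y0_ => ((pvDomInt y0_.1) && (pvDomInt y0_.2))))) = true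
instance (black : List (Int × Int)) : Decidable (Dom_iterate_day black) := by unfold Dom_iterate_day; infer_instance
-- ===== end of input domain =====

-- B replaces A's single tally-dict accumulation by a candidate-set collection pass plus a
-- per-candidate rescan of the black list (alternative decomposition, same results).


-- ===== PORT A =====
-- deltas.values() of the module-level dict, in insertion order
def pvDeltas : List (Int × Int) := [(-1, 1), (-1, 0), (0, -1), (1, -1), (1, 0), (0, 1)]

def pvNeighbors (pos : Int × Int) : List (Int × Int) :=
  pvDeltas.map (fun d => (pos.1 + d.1, pos.2 + d.2))

def iterate_day (black : List (Int × Int)) : List (Int × Int) :=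
  let tiles_adj : PySem.Dict (Int × Int) Int :=
    black.foldl (fun d tile =>
      (pvNeighbors tile).foldl (fun d n => d.insert n (d.getD n 0 + 1)) d) PySem.Dict.empty
  tiles_adj.keys.foldl (fun s tile =>
    if black.contains tile && decide (1 ≤ tiles_adj.getD tile 0 ∧ tiles_adj.getD tile 0 ≤ 2) then
      PySem.Set.add s tile
    else if !black.contains tile && (tiles_adj.getD tile 0 == 2) then
      PySem.Set.add s tile
    else s) PySem.Set.empty

-- ===== PORT B =====
def iterate_day_alt (black : List (Int × Int)) : List (Int × Int) :=
  let candidates : PySem.Set (Int × Int) :=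
    black.foldl (fun s tile => PySem.Set.update s (pvNeighbors tile)) PySem.Set.empty
  candidates.foldl (fun s tile =>
    let nbrs := pvNeighbors tile
    let cnt : Int := black.countP (fun b => nbrs.contains b)
    if black.contains tile then
      (if 1 ≤ cnt ∧ cnt ≤ 2 then PySem.Set.add s tile else s)
    else if cnt == 2 then PySem.Set.add s tile else s) PySem.Set.empty

-- ===== PRECONDITION & SPEC =====
def Spec_iterate_day (black : List (Int × Int)) (out : List (Int × Int)) : Prop := out = iterate_day_alt black
instance (black : List (Int × Int)) (out : List (Int × Int)) : Decidable (Spec_iterate_day black out) := by unfold Spec_iterate_day; infer_instance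

-- ===== CLAIM (what is proved, stated in full; the proofs are below) =====
def Claim_equal_iterate_day : Prop := ∀ (black : List (Int × Int)), Dom_iterate_day black → Spec_iterate_day black (iterate_day black)

-- ===== LEMMAS AND PROOFS =====

theorem nodup_pvNeighbors (p : Int × Int) : (pvNeighbors p).Nodup := by
  obtain ⟨x, y⟩ := p
  simp [pvNeighbors, pvDeltas, Prod.ext_iff]

theorem mem_pvNeighbors_comm (a b : Int × Int) : a ∈ pvNeighbors b ↔ b ∈ pvNeighbors a := by
  obtain ⟨a1, a2⟩ := a; obtain ⟨b1, b2⟩ := b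
  simp [pvNeighbors, pvDeltas, Prod.ext_iff]
  omega

-- the tally dict's keys are exactly B's candidate set, in the same order
theorem keys_dict_eq (black : List (Int × Int)) (d : PySem.Dict (Int × Int) Int)
    (s : PySem.Set (Int × Int)) (h : d.keys = s) :
    (black.foldl (fun d tile =>
      (pvNeighbors tile).foldl (fun d n => d.insert n (d.getD n 0 + 1)) d) d).keys
      = black.foldl (fun s tile => PySem.Set.update s (pvNeighbors tile)) s := by
  induction black generalizing d s with
  | nil => simpa using h
  | cons t rest ih =>
    simp only [List.foldl_cons]
    exact ih _ _ (by rw [PySem.Dict.keys_foldl_insert, h])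

-- the tally dict's count at t is the number of black tiles adjacent to t
theorem getD_dict_eq (black : List (Int × Int)) (d : PySem.Dict (Int × Int) Int) (t : Int × Int) :
    (black.foldl (fun d tile =>
      (pvNeighbors tile).foldl (fun d n => d.insert n (d.getD n 0 + 1)) d) d).getD t 0
      = d.getD t 0 + (black.countP (fun b => (pvNeighbors t).contains b) : Int) := by
  induction black generalizing d with
  | nil => simp
  | cons b rest ih =>
    simp only [List.foldl_cons, List.countP_cons]
    rw [ih, PySem.Dict.getD_foldl_insert_add_one]
    have hcount : (pvNeighbors b).count t = if (pvNeighbors t).contains b then 1 else 0 := by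
      by_cases hm : t ∈ pvNeighbors b
      · rw [List.count_eq_one_of_mem (nodup_pvNeighbors b) hm]
        have hb : b ∈ pvNeighbors t := (mem_pvNeighbors_comm t b).mp hm
        simp [hb]
      · rw [List.count_eq_zero_of_not_mem hm]
        have hb : b ∉ pvNeighbors t := fun h => hm ((mem_pvNeighbors_comm t b).mpr h)
        simp [hb]
    rw [hcount]
    split_ifs <;> push_cast <;> ring

-- ===== VERDICT (by name: the statement is the Claim_ definition above) =====
theorem iterate_day_spec : Claim_equal_iterate_day := by
  intro black _
  unfold Spec_iterate_day
  simp only [iterate_day, iterate_day_alt]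
  rw [keys_dict_eq black PySem.Dict.empty PySem.Set.empty rfl]
  apply PySem.List.foldl_congr_mem
  intro s t _
  rw [getD_dict_eq black PySem.Dict.empty t]
  simp only [PySem.Dict.getD_empty, zero_add]
  rcases Bool.eq_false_or_eq_true (black.contains t) with hc | hc <;>
    simp only [hc, Bool.true_and, Bool.false_and, Bool.not_true, Bool.not_false,
      Bool.false_eq_true, if_true, if_false, decide_eq_true_eq]
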